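-- pv_equiv track=rewrite | github.com/plejdrup85-source/masterdata | backend/diff_display.py | _compute_added_removed
-- ===== SOURCE A (Python) =====
-- def _normalize_token(token: str) -> str:
--     """Normalize a token for comparison: lowercase, strip trailing punctuation."""
--     return token.lower().rstrip(".,;:!?")
--
-- def _longest_common_subsequence(a: list[str], b: list[str]) -> list[str]:
--     """Find longest common subsequence of two token lists.
--
--     Used for identifying what's shared between current and proposed.
--     Optimized for short-to-medium texts (typical product fields).
--     """
--     # Cap at 200 tokens to avoid O(n²) on very long texts
--     a = a[:200]
--     b = b[:200]
--
--     m, n = len(a), len(b)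
--     dp = [[0] * (n + 1) for _ in range(m + 1)]
--
--     for i in range(1, m + 1):
--         for j in range(1, n + 1):
--             if _normalize_token(a[i - 1]) == _normalize_token(b[j - 1]):
--                 dp[i][j] = dp[i - 1][j - 1] + 1
--             else:
--                 dp[i][j] = max(dp[i - 1][j], dp[i][j - 1])
--
--     # Backtrack to find LCS
--     lcs = []
--     i, j = m, n
--     while i > 0 and j > 0:
--         if _normalize_token(a[i - 1]) == _normalize_token(b[j - 1]):
--             lcs.append(a[i - 1])
--             i -= 1
--             j -= 1
--         elif dp[i - 1][j] >= dp[i][j - 1]: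
--             i -= 1
--         else:
--             j -= 1
--     lcs.reverse()
--     return lcs
--
-- def _compute_added_removed(
--     current_tokens: list[str],
--     proposed_tokens: list[str],
-- ) -> tuple[list[str], list[str]]:
--     """Compute which tokens were added and which were removed.
--
--     Returns (added_tokens, removed_tokens).
--     """
--     lcs = _longest_common_subsequence(current_tokens, proposed_tokens)
--     lcs_normalized = {}
--     for token in lcs:
--         key = _normalize_token(token)
--         lcs_normalized[key] = lcs_normalized.get(key, 0) + 1
--
--     # Removed = in current but not in LCS
--     removed = []
--     lcs_remaining = dict(lcs_normalized)
--     for token in current_tokens: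
--         key = _normalize_token(token)
--         if lcs_remaining.get(key, 0) > 0:
--             lcs_remaining[key] -= 1
--         else:
--             removed.append(token)
--
--     # Added = in proposed but not in LCS
--     added = []
--     lcs_remaining = dict(lcs_normalized)
--     for token in proposed_tokens:
--         key = _normalize_token(token)
--         if lcs_remaining.get(key, 0) > 0:
--             lcs_remaining[key] -= 1
--         else:
--             added.append(token)
--
--     return added, removed
-- ===== SOURCE B (Python) =====
-- def _normalize_token(token: str) -> str:
--     return token.lower().rstrip(".,;:!?")
--
--
-- def _compute_added_removed(current_tokens, proposed_tokens):
--     """Top-down memoized LCS instead of a bottom-up dp table; same 200-token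
--     cap, normalization and >=-tie-break, so the selected LCS is identical."""
--     a = current_tokens[:200]
--     b = proposed_tokens[:200]
--     na = [_normalize_token(t) for t in a]
--     nb = [_normalize_token(t) for t in b]
--     memo = {}
--
--     def lcs_len(i, j):
--         if (i, j) in memo:
--             return memo[(i, j)]
--         if i == 0 or j == 0:
--             v = 0
--         elif na[i - 1] == nb[j - 1]:
--             v = lcs_len(i - 1, j - 1) + 1
--         else:
--             v = max(lcs_len(i - 1, j), lcs_len(i, j - 1))
--         memo[(i, j)] = v
--         return v
--
--     def reconstruct(i, j):
--         if i == 0 or j == 0: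
--             return []
--         if na[i - 1] == nb[j - 1]:
--             return reconstruct(i - 1, j - 1) + [a[i - 1]]
--         if lcs_len(i - 1, j) >= lcs_len(i, j - 1):
--             return reconstruct(i - 1, j)
--         return reconstruct(i, j - 1)
--
--     lcs_len(len(a), len(b))
--     lcs = reconstruct(len(a), len(b))
--
--     need = {}
--     for t in lcs:
--         k = _normalize_token(t)
--         need[k] = need.get(k, 0) + 1
--
--     def leftover(tokens, remaining):
--         out = []
--         for t in tokens:
--             k = _normalize_token(t)
--             if remaining.get(k, 0) > 0:
--                 remaining[k] -= 1
--             else: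
--                 out.append(t)
--         return out
--
--     removed = leftover(current_tokens, dict(need))
--     added = leftover(proposed_tokens, dict(need))
--     return added, removed
-- ===== Notes on version B (the rewrite author's own statement) =====
-- stated objective: alternative
-- what changed: The bottom-up dp table fill plus while-loop backtrack is replaced by a top-down memoized recursion lcs_len(i,j) with a recursive LCS reconstruction using the same >= tie-break, and the added/removed bookkeeping is factored into one shared leftover helper; normalization and the 200-token cap are unchanged.
import Mathlib
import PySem

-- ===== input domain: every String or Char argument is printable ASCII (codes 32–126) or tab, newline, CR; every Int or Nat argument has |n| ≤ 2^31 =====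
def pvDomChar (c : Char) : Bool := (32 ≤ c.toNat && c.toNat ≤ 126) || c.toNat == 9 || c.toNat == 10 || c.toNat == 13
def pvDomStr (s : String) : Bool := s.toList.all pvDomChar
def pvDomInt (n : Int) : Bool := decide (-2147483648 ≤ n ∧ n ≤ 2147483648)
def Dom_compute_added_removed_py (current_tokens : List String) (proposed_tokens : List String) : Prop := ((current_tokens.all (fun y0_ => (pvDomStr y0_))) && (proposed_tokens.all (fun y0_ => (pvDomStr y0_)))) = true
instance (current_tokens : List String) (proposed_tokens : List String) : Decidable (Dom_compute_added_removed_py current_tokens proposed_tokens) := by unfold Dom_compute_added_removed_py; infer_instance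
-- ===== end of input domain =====

-- B replaces the bottom-up dp table + while-loop backtrack with a top-down memoized
-- recursion and a recursive reconstruction (same >= tie-break); same results, no speed claim.

-- ===== shared module helper: _normalize_token =====
-- str.rstrip(chars) has no PySem primitive; ported by hand on code points:
-- drop trailing characters that occur in `chars` — exact for every string.
def pyRstripChars (cs : List Char) (chars : List Char) : List Char :=
  (cs.reverse.dropWhile (fun c => chars.contains c)).reverse

-- _normalize_token, kept as a list of code points (String.toList is injective, so
-- comparing / keying on the code-point lists is exact for Python's str == / dict keys).
def nrm (t : String) : List Char :=
  pyRstripChars (PySem.Chars.lower t.toList) ".,;:!?".toList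

-- ===== PORT A =====
-- one execution of the dp[i][j] = … assignment (body of the nested for loops)
def dpCellA (a b : List String) (dp : List (List Int)) (i j : Int) : List (List Int) :=
  let v : Int :=
    if nrm (PySem.List.pyGetD a (i - 1) "") == nrm (PySem.List.pyGetD b (j - 1) "") then
      (PySem.List.pyGetD (PySem.List.pyGetD dp (i - 1) []) (j - 1) 0) + 1
    else
      max (PySem.List.pyGetD (PySem.List.pyGetD dp (i - 1) []) j 0)
          (PySem.List.pyGetD (PySem.List.pyGetD dp i []) (j - 1) 0)
  PySem.List.pySetD dp i (PySem.List.pySetD (PySem.List.pyGetD dp i []) j v)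

-- the backtracking while loop (i, j stay ≥ 0, so Nat indexing is exact here)
def backA (a b : List String) (dp : List (List Int)) : Nat → Nat → List String → List String
  | i + 1, j + 1, lcs =>
    if nrm (a.getD i "") == nrm (b.getD j "") then
      backA a b dp i j (lcs ++ [a.getD i ""])
    else if (dp.getD i []).getD (j + 1) 0 ≥ (dp.getD (i + 1) []).getD j 0 then
      backA a b dp i (j + 1) lcs
    else
      backA a b dp (i + 1) j lcs
  | _, _, lcs => lcs
termination_by i j _ => i + j

-- _longest_common_subsequence
def lcsA (a0 b0 : List String) : List String :=
  let a := PySem.List.slice a0 none (some 200)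
  let b := PySem.List.slice b0 none (some 200)
  let m := a.length
  let n := b.length
  let dp0 := (PySem.List.pyRange 0 ((m : Int) + 1) 1).map (fun _ => List.replicate (n + 1) (0 : Int))
  let dp := (PySem.List.pyRange 1 ((m : Int) + 1) 1).foldl
    (fun dp i => (PySem.List.pyRange 1 ((n : Int) + 1) 1).foldl (fun dp j => dpCellA a b dp i j) dp)
    dp0
  (backA a b dp m n []).reverse

-- _compute_added_removed; `lcs_remaining[key] -= 1` is taken only when the key is
-- present (getD > 0), so insert (getD - 1) is value-exact.
def compute_added_removed_py (current_tokens : List String) (proposed_tokens : List String) : List String × List String :=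
  let lcs := lcsA current_tokens proposed_tokens
  let lcs_normalized : PySem.Dict (List Char) Int :=
    lcs.foldl (fun d token => d.insert (nrm token) (d.getD (nrm token) 0 + 1)) PySem.Dict.empty
  let removed := (current_tokens.foldl
    (fun (st : List String × PySem.Dict (List Char) Int) token =>
      let key := nrm token
      if st.2.getD key 0 > 0 then (st.1, st.2.insert key (st.2.getD key 0 - 1))
      else (st.1 ++ [token], st.2))
    ([], lcs_normalized)).1
  let added := (proposed_tokens.foldl
    (fun (st : List String × PySem.Dict (List Char) Int) token =>
      let key := nrm token
      if st.2.getD key 0 > 0 then (st.1, st.2.insert key (st.2.getD key 0 - 1))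
      else (st.1 ++ [token], st.2))
    ([], lcs_normalized)).1
  (added, removed)

-- ===== PORT B =====
-- the memoized lcs_len(i, j): the memo dict is threaded through explicitly
def lcsLenB (na nb : List (List Char)) (i j : Nat)
    (mo : PySem.Dict (Nat × Nat) Int) : Int × PySem.Dict (Nat × Nat) Int :=
  match mo.get? (i, j) with
    | some v => (v, mo)
    | none =>
      match i, j with
      | 0, j => (0, mo.insert (0, j) 0)
      | i + 1, 0 => (0, mo.insert (i + 1, 0) 0)
      | i + 1, j + 1 =>
        if na.getD i [] == nb.getD j [] then
          let r := lcsLenB na nb i j mo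
          (r.1 + 1, r.2.insert (i + 1, j + 1) (r.1 + 1))
        else
          let r1 := lcsLenB na nb i (j + 1) mo
          let r2 := lcsLenB na nb (i + 1) j r1.2
          (max r1.1 r2.1, r2.2.insert (i + 1, j + 1) (max r1.1 r2.1))
termination_by (i, j)

-- reconstruct(i, j); its calls to lcs_len hit the cache, so the memo is threaded too
def reconB (na nb : List (List Char)) (a : List String) :
    Nat → Nat → PySem.Dict (Nat × Nat) Int → List String × PySem.Dict (Nat × Nat) Int
  | 0, _, mo => ([], mo)
  | _ + 1, 0, mo => ([], mo)
  | i + 1, j + 1, mo =>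
    if na.getD i [] == nb.getD j [] then
      let r := reconB na nb a i j mo
      (r.1 ++ [a.getD i ""], r.2)
    else
      let r1 := lcsLenB na nb i (j + 1) mo
      let r2 := lcsLenB na nb (i + 1) j r1.2
      if r1.1 ≥ r2.1 then reconB na nb a i (j + 1) r2.2
      else reconB na nb a (i + 1) j r2.2
termination_by i j _ => i + j

-- the leftover helper (loop state: output list and the remaining multiset)
def leftoverB (need : PySem.Dict (List Char) Int) (tokens : List String) : List String :=
  (tokens.foldl
    (fun (st : List String × PySem.Dict (List Char) Int) t =>
      let k := nrm t
      if st.2.getD k 0 > 0 then (st.1, st.2.insert k (st.2.getD k 0 - 1))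
      else (st.1 ++ [t], st.2))
    ([], need)).1

def compute_added_removed_py_alt (current_tokens : List String) (proposed_tokens : List String) : List String × List String :=
  let a := PySem.List.slice current_tokens none (some 200)
  let b := PySem.List.slice proposed_tokens none (some 200)
  let na := a.map nrm
  let nb := b.map nrm
  let mo := (lcsLenB na nb a.length b.length PySem.Dict.empty).2
  let lcs := (reconB na nb a a.length b.length mo).1
  let need : PySem.Dict (List Char) Int :=
    lcs.foldl (fun d t => d.insert (nrm t) (d.getD (nrm t) 0 + 1)) PySem.Dict.empty
  (leftoverB need proposed_tokens, leftoverB need current_tokens)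

-- ===== PRECONDITION & SPEC =====
def Spec_compute_added_removed_py (current_tokens : List String) (proposed_tokens : List String) (out : List String × List String) : Prop := out = compute_added_removed_py_alt current_tokens proposed_tokens
instance (current_tokens : List String) (proposed_tokens : List String) (out : List String × List String) : Decidable (Spec_compute_added_removed_py current_tokens proposed_tokens out) := by unfold Spec_compute_added_removed_py; infer_instance

-- ===== CLAIM (what is proved, stated in full; the proofs are below) =====
def Claim_equal_compute_added_removed_py : Prop := ∀ (current_tokens : List String) (proposed_tokens : List String), Dom_compute_added_removed_py current_tokens proposed_tokens → Spec_compute_added_removed_py current_tokens proposed_tokens (compute_added_removed_py current_tokens proposed_tokens)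

-- ===== LEMMAS AND PROOFS =====

-- the mathematical LCS-length table both programs compute
def L (na nb : List (List Char)) : Nat → Nat → Int
  | 0, _ => 0
  | _ + 1, 0 => 0
  | i + 1, j + 1 =>
    if na.getD i [] == nb.getD j [] then L na nb i j + 1
    else max (L na nb i (j + 1)) (L na nb (i + 1) j)
termination_by i j => i + j

-- the LCS both programs select (A by backtracking, B by recursive reconstruction)
def idealLcs (na nb : List (List Char)) (a : List String) : Nat → Nat → List String
  | 0, _ => []
  | _ + 1, 0 => []
  | i + 1, j + 1 =>
    if na.getD i [] == nb.getD j [] then idealLcs na nb a i j ++ [a.getD i ""]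
    else if L na nb i (j + 1) ≥ L na nb (i + 1) j then idealLcs na nb a i (j + 1)
    else idealLcs na nb a (i + 1) j
termination_by i j => i + j

theorem L_zero_left (na nb : List (List Char)) (j : Nat) : L na nb 0 j = 0 := by
  cases j <;> simp [L]

theorem L_zero_right (na nb : List (List Char)) (i : Nat) : L na nb i 0 = 0 := by
  cases i <;> simp [L]

theorem getD_map_nrm (a : List String) (i : Nat) :
    (a.map nrm).getD i [] = nrm (a.getD i "") := by
  rcases h : a[i]? with _ | t
  · simp [List.getD, List.getElem?_map, h]; rfl
  · simp [List.getD, List.getElem?_map, h]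

-- ===== B side: the memoized recursion computes L =====

def GoodM (na nb : List (List Char)) (mo : PySem.Dict (Nat × Nat) Int) : Prop :=
  ∀ p v, mo.get? p = some v → v = L na nb p.1 p.2

theorem goodM_empty (na nb : List (List Char)) : GoodM na nb PySem.Dict.empty := by
  intro p v h
  simp at h

theorem goodM_insert (na nb : List (List Char)) (mo : PySem.Dict (Nat × Nat) Int)
    (i j : Nat) (h : GoodM na nb mo) :
    GoodM na nb (mo.insert (i, j) (L na nb i j)) := by
  intro p v hv
  rw [PySem.Dict.get?_insert] at hv
  split at hv
  · rename_i hp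
    subst hp
    simp at hv
    simpa using hv.symm
  · exact h p v hv

theorem lcsLenB_spec (na nb : List (List Char)) :
    ∀ (N i j : Nat) (mo : PySem.Dict (Nat × Nat) Int), i + j ≤ N → GoodM na nb mo →
      (lcsLenB na nb i j mo).1 = L na nb i j ∧ GoodM na nb (lcsLenB na nb i j mo).2 := by
  intro N
  induction N with
  | zero =>
    intro i j mo hij hgood
    have hi : i = 0 := by omega
    have hj : j = 0 := by omega
    subst hi; subst hj
    rw [lcsLenB.eq_def]
    cases hg : mo.get? (0, 0) with
    | some v =>
      exact ⟨by simpa using hgood _ _ hg, hgood⟩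
    | none =>
      constructor
      · exact (L_zero_left na nb 0).symm
      · have h0 : (0 : Int) = L na nb 0 0 := (L_zero_left na nb 0).symm
        show GoodM na nb (mo.insert (0, 0) 0)
        rw [h0]
        exact goodM_insert na nb mo 0 0 hgood
  | succ N ih =>
    intro i j mo hij hgood
    rw [lcsLenB.eq_def]
    cases hg : mo.get? (i, j) with
    | some v =>
      exact ⟨by simpa using hgood _ _ hg, hgood⟩
    | none =>
      cases i with
      | zero =>
        constructor
        · exact (L_zero_left na nb j).symm
        · have h0 : (0 : Int) = L na nb 0 j := (L_zero_left na nb j).symm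
          show GoodM na nb (mo.insert (0, j) 0)
          rw [h0]
          exact goodM_insert na nb mo 0 j hgood
      | succ i' =>
        cases j with
        | zero =>
          constructor
          · exact (L_zero_right na nb (i' + 1)).symm
          · have h0 : (0 : Int) = L na nb (i' + 1) 0 := (L_zero_right na nb (i' + 1)).symm
            show GoodM na nb (mo.insert (i' + 1, 0) 0)
            rw [h0]
            exact goodM_insert na nb mo (i' + 1) 0 hgood
        | succ j' =>
          by_cases heq : na.getD i' [] = nb.getD j' []
          · obtain ⟨h1, h2⟩ := ih i' j' mo (by omega) hgood
            have hb : (na.getD i' [] == nb.getD j' []) = true := beq_iff_eq.mpr heq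
            have hL : L na nb (i' + 1) (j' + 1) = L na nb i' j' + 1 := by
              rw [L]
              simp only [hb, if_true]
            simp only [hb, if_true]
            constructor
            · simp [h1, hL]
            · show GoodM na nb ((lcsLenB na nb i' j' mo).2.insert (i' + 1, j' + 1)
                ((lcsLenB na nb i' j' mo).1 + 1))
              rw [h1, ← hL]
              exact goodM_insert na nb _ (i' + 1) (j' + 1) h2
          · obtain ⟨h11, h12⟩ := ih i' (j' + 1) mo (by omega) hgood
            obtain ⟨h21, h22⟩ := ih (i' + 1) j' (lcsLenB na nb i' (j' + 1) mo).2 (by omega) h12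
            have hbeq : (na.getD i' [] == nb.getD j' []) = false := beq_eq_false_iff_ne.mpr heq
            have hL : L na nb (i' + 1) (j' + 1) =
                max (L na nb i' (j' + 1)) (L na nb (i' + 1) j') := by
              rw [L]
              simp only [hbeq, Bool.false_eq_true, if_false]
            simp only [hbeq, Bool.false_eq_true, if_false]
            constructor
            · simp [h11, h21, hL]
            · show GoodM na nb ((lcsLenB na nb (i' + 1) j' (lcsLenB na nb i' (j' + 1) mo).2).2.insert
                (i' + 1, j' + 1) (max (lcsLenB na nb i' (j' + 1) mo).1
                  (lcsLenB na nb (i' + 1) j' (lcsLenB na nb i' (j' + 1) mo).2).1))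
              rw [h11, h21, ← hL]
              exact goodM_insert na nb _ (i' + 1) (j' + 1) h22

theorem reconB_spec (na nb : List (List Char)) (a : List String) :
    ∀ (N i j : Nat) (mo : PySem.Dict (Nat × Nat) Int), i + j ≤ N → GoodM na nb mo →
      (reconB na nb a i j mo).1 = idealLcs na nb a i j := by
  intro N
  induction N with
  | zero =>
    intro i j mo hij hgood
    have hi : i = 0 := by omega
    have hj : j = 0 := by omega
    subst hi; subst hj
    rw [reconB, idealLcs]
  | succ N ih =>
    intro i j mo hij hgood
    cases i with
    | zero => rw [reconB, idealLcs]
    | succ i' =>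
      cases j with
      | zero => rw [reconB, idealLcs]
      | succ j' =>
        rw [reconB, idealLcs]
        by_cases heq : na.getD i' [] = nb.getD j' []
        · simp only [beq_iff_eq.mpr heq, if_true]
          rw [ih i' j' mo (by omega) hgood]
        · have hbeq : (na.getD i' [] == nb.getD j' []) = false := beq_eq_false_iff_ne.mpr heq
          simp only [hbeq, if_false, Bool.false_eq_true]
          obtain ⟨h11, h12⟩ := lcsLenB_spec na nb (i' + (j' + 1)) i' (j' + 1) mo (le_refl _) hgood
          obtain ⟨h21, h22⟩ := lcsLenB_spec na nb ((i' + 1) + j') (i' + 1) j'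
            (lcsLenB na nb i' (j' + 1) mo).2 (le_refl _) h12
          rw [h11, h21]
          by_cases hge : L na nb i' (j' + 1) ≥ L na nb (i' + 1) j'
          · rw [if_pos hge, if_pos hge]
            exact ih i' (j' + 1) _ (by omega) h22
          · rw [if_neg hge, if_neg hge]
            exact ih (i' + 1) j' _ (by omega) h22

-- ===== A side: the dp table holds L, the backtrack selects idealLcs =====

-- row r of the final table, filled up to column c (later cells still 0)
def rowP (na nb : List (List Char)) (n r c : Nat) : List Int :=
  (List.range (n + 1)).map (fun q => if q ≤ c then L na nb r q else 0)

-- table state: rows < r final, row r filled to column c, rows > r untouched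
def dpMid (na nb : List (List Char)) (m n r c : Nat) : List (List Int) :=
  (List.range r).map (fun q => rowP na nb n q n) ++
    rowP na nb n r c :: List.replicate (m - r) (List.replicate (n + 1) 0)

theorem rowP_getD (na nb : List (List Char)) (n r c q : Nat) (hq : q ≤ n) :
    (rowP na nb n r c).getD q 0 = if q ≤ c then L na nb r q else 0 := by
  simp [rowP, List.getD, Nat.lt_succ_of_le hq]

theorem rowP_zero (na nb : List (List Char)) (n r : Nat) :
    rowP na nb n r 0 = List.replicate (n + 1) 0 := by
  rw [rowP, List.eq_replicate_iff]
  constructor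
  · simp
  · intro x hx
    simp at hx
    obtain ⟨q, hq, rfl⟩ := hx
    split
    · rename_i hq0
      have : q = 0 := by omega
      subst this
      exact L_zero_right na nb r
    · rfl

theorem dpMid_getD_lt (na nb : List (List Char)) (m n r c q : Nat) (hq : q < r) :
    (dpMid na nb m n r c).getD q [] = rowP na nb n q n := by
  rw [dpMid, List.getD_append _ _ _ q (by simpa using hq)]
  simp [List.getD, hq]

theorem dpMid_getD_self (na nb : List (List Char)) (m n r c : Nat) :
    (dpMid na nb m n r c).getD r [] = rowP na nb n r c := by
  have hlen : ((List.range r).map (fun q => rowP na nb n q n)).length = r := by simp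
  rw [dpMid, List.getD, List.getElem?_append_right (by omega)]
  simp [hlen]

theorem dpMid_set (na nb : List (List Char)) (m n r c : Nat) (row : List Int) :
    (dpMid na nb m n r c).set r row =
      (List.range r).map (fun q => rowP na nb n q n) ++
        row :: List.replicate (m - r) (List.replicate (n + 1) 0) := by
  have hlen : ((List.range r).map (fun q => rowP na nb n q n)).length = r := by simp
  rw [dpMid, List.set_append]
  simp [hlen]

theorem rowP_set (na nb : List (List Char)) (n r c : Nat) :
    (rowP na nb n r c).set (c + 1) (L na nb r (c + 1)) = rowP na nb n r (c + 1) := by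
  apply List.ext_getElem
  · simp [rowP]
  · intro q h1 h2
    simp only [rowP, List.length_set, List.length_map, List.length_range] at h1 h2 ⊢
    simp only [List.getElem_set, List.getElem_map, List.getElem_range]
    by_cases hq : q = c + 1
    · subst hq
      rw [if_pos rfl, if_pos (by omega)]
    · rw [if_neg (fun h => hq h.symm)]
      by_cases hle : q ≤ c
      · rw [if_pos hle, if_pos (by omega)]
      · rw [if_neg hle, if_neg (by omega)]

-- one assignment dp[r][c+1] = … advances the state by one column
theorem dpCellA_step (a b : List String) (m n r c : Nat)
    (hn : n = b.length) (hc : c < n) :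
    dpCellA a b (dpMid (a.map nrm) (b.map nrm) m n (r + 1) c) ((r : Int) + 1) ((c : Int) + 1) =
      dpMid (a.map nrm) (b.map nrm) m n (r + 1) (c + 1) := by
  have er2 : ((r : Int) + 1) = (((r + 1 : Nat)) : Int) := by push_cast; ring
  have ec2 : ((c : Int) + 1) = (((c + 1 : Nat)) : Int) := by push_cast; ring
  have er : (((r + 1 : Nat)) : Int) - 1 = ((r : Nat) : Int) := by push_cast; ring
  have ec : (((c + 1 : Nat)) : Int) - 1 = ((c : Nat) : Int) := by push_cast; ring
  simp only [dpCellA, er2, ec2, er, ec, PySem.List.pyGetD_natCast, PySem.List.pySetD_natCast]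
  rw [← getD_map_nrm a r, ← getD_map_nrm b c]
  rw [dpMid_getD_lt (a.map nrm) (b.map nrm) m n (r + 1) c r (by omega)]
  rw [dpMid_getD_self (a.map nrm) (b.map nrm) m n (r + 1) c]
  rw [rowP_getD (a.map nrm) (b.map nrm) n r n c (by omega)]
  rw [rowP_getD (a.map nrm) (b.map nrm) n r n (c + 1) (by omega)]
  rw [rowP_getD (a.map nrm) (b.map nrm) n (r + 1) c c (by omega)]
  rw [if_pos (show c ≤ n by omega), if_pos (show c + 1 ≤ n by omega),
    if_pos (le_refl c)]
  have hv : (if (a.map nrm).getD r [] == (b.map nrm).getD c []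
      then L (a.map nrm) (b.map nrm) r c + 1
      else max (L (a.map nrm) (b.map nrm) r (c + 1)) (L (a.map nrm) (b.map nrm) (r + 1) c)) =
      L (a.map nrm) (b.map nrm) (r + 1) (c + 1) := by
    rw [L]
  rw [hv, rowP_set, dpMid_set, dpMid]

-- the inner for loop fills row r + 1 completely
theorem inner_loop (a b : List String) (m n r : Nat)
    (hn : n = b.length) :
    (PySem.List.pyRange 1 ((n : Int) + 1) 1).foldl
        (fun dp j => dpCellA a b dp ((r : Int) + 1) j)
        (dpMid (a.map nrm) (b.map nrm) m n (r + 1) 0) =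
      dpMid (a.map nrm) (b.map nrm) m n (r + 1) n := by
  have hconv : PySem.List.pyRange 1 ((n : Int) + 1) 1 = (List.range n).map (fun (k : Nat) => 1 + (k : Int)) := by
    rw [PySem.List.pyRange_one, show ((n : Int) + 1 - 1).toNat = n from by omega]
  rw [hconv, List.foldl_map]
  have aux : ∀ c : Nat, c ≤ n →
      (List.range c).foldl (fun dp (k : Nat) => dpCellA a b dp ((r : Int) + 1) (1 + (k : Int)))
        (dpMid (a.map nrm) (b.map nrm) m n (r + 1) 0) =
      dpMid (a.map nrm) (b.map nrm) m n (r + 1) c := by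
    intro c
    induction c with
    | zero => intro _; simp
    | succ c ihc =>
      intro hc
      rw [List.range_succ, List.foldl_append, ihc (by omega)]
      simp only [List.foldl_cons, List.foldl_nil]
      rw [show (1 + (c : Int)) = ((c : Int) + 1) from by ring]
      exact dpCellA_step a b m n r c hn (by omega)
  exact aux n (le_refl n)

-- the outer loop turns the zero table into the full L table
theorem rowP_row_zero (na nb : List (List Char)) (n c : Nat) :
    rowP na nb n 0 c = List.replicate (n + 1) 0 := by
  rw [rowP, List.eq_replicate_iff]
  constructor
  · simp
  · intro x hx
    simp at hx
    obtain ⟨q, hq, rfl⟩ := hx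
    rw [L_zero_left]
    split <;> rfl

theorem dpMid_row_done (na nb : List (List Char)) (m n r : Nat) (hr : r < m) :
    dpMid na nb m n r n = dpMid na nb m n (r + 1) 0 := by
  rw [dpMid, dpMid, List.range_succ, List.map_append]
  rw [rowP_zero]
  rw [show m - r = (m - (r + 1)) + 1 from by omega, List.replicate_succ]
  simp

theorem outer_loop (a b : List String) (m n : Nat)
    (hm : m = a.length) (hn : n = b.length) :
    (PySem.List.pyRange 1 ((m : Int) + 1) 1).foldl
        (fun dp i => (PySem.List.pyRange 1 ((n : Int) + 1) 1).foldl
          (fun dp j => dpCellA a b dp i j) dp)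
        ((PySem.List.pyRange 0 ((m : Int) + 1) 1).map (fun _ => List.replicate (n + 1) (0 : Int))) =
      dpMid (a.map nrm) (b.map nrm) m n m n := by
  have hzeros : (PySem.List.pyRange 0 ((m : Int) + 1) 1).map (fun _ => List.replicate (n + 1) (0 : Int)) =
      List.replicate (m + 1) (List.replicate (n + 1) (0 : Int)) := by
    rw [List.eq_replicate_iff]
    constructor
    · rw [List.length_map, PySem.List.pyRange_one,
        show ((m : Int) + 1 - 0).toNat = m + 1 from by omega]
      simp
    · intro x hx
      simp only [List.mem_map] at hx
      obtain ⟨y, _, rfl⟩ := hx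
      rfl
  have hinit : (PySem.List.pyRange 0 ((m : Int) + 1) 1).map (fun _ => List.replicate (n + 1) (0 : Int)) =
      dpMid (a.map nrm) (b.map nrm) m n 0 n := by
    rw [hzeros, dpMid, rowP_row_zero]
    simp [List.replicate_succ]
  rw [hinit]
  have hconv : PySem.List.pyRange 1 ((m : Int) + 1) 1 = (List.range m).map (fun (k : Nat) => 1 + (k : Int)) := by
    rw [PySem.List.pyRange_one, show ((m : Int) + 1 - 1).toNat = m from by omega]
  rw [hconv, List.foldl_map]
  have aux : ∀ r : Nat, r ≤ m →
      (List.range r).foldl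
        (fun dp (k : Nat) => (PySem.List.pyRange 1 ((n : Int) + 1) 1).foldl
          (fun dp j => dpCellA a b dp (1 + (k : Int)) j) dp)
        (dpMid (a.map nrm) (b.map nrm) m n 0 n) =
      dpMid (a.map nrm) (b.map nrm) m n r n := by
    intro r
    induction r with
    | zero => intro _; simp
    | succ r ihr =>
      intro hrm
      rw [List.range_succ, List.foldl_append, ihr (by omega)]
      simp only [List.foldl_cons, List.foldl_nil]
      rw [dpMid_row_done (a.map nrm) (b.map nrm) m n r (by omega)]
      have : ∀ dp j, dpCellA a b dp (1 + (r : Int)) j = dpCellA a b dp ((r : Int) + 1) j := by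
        intro dp j
        rw [show (1 + (r : Int)) = ((r : Int) + 1) from by ring]
      simp only [this]
      exact inner_loop a b m n r hn
  exact aux m (le_refl m)

theorem backA_eq (a b : List String) (dp : List (List Int)) (m n : Nat)
    (hm : m = a.length) (hn : n = b.length)
    (hdp : ∀ i j : Nat, i ≤ m → j ≤ n → (dp.getD i []).getD j 0 = L (a.map nrm) (b.map nrm) i j) :
    ∀ (N i j : Nat), i + j ≤ N → i ≤ m → j ≤ n → ∀ (acc : List String),
      backA a b dp i j acc = acc ++ (idealLcs (a.map nrm) (b.map nrm) a i j).reverse := by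
  intro N
  induction N with
  | zero =>
    intro i j hij hi hj acc
    have h1 : i = 0 := by omega
    have h2 : j = 0 := by omega
    subst h1; subst h2
    rw [backA, idealLcs] <;> intros <;> first | simp | omega
  | succ N ih =>
    intro i j hij hi hj acc
    cases i with
    | zero =>
      rw [backA, idealLcs] <;> intros <;> first | simp | omega
    | succ i' =>
      cases j with
      | zero =>
        rw [backA, idealLcs] <;> intros <;> first | simp | omega
      | succ j' =>
        rw [backA, idealLcs]
        rw [← getD_map_nrm a i', ← getD_map_nrm b j']
        by_cases heq : (a.map nrm).getD i' [] = (b.map nrm).getD j' []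
        · simp only [beq_iff_eq.mpr heq, if_true]
          rw [ih i' j' (by omega) (by omega) (by omega) (acc ++ [a.getD i' ""])]
          simp
        · simp only [beq_eq_false_iff_ne.mpr heq, Bool.false_eq_true, if_false]
          rw [hdp i' (j' + 1) (by omega) (by omega), hdp (i' + 1) j' (by omega) (by omega)]
          by_cases hge : L (a.map nrm) (b.map nrm) i' (j' + 1) ≥ L (a.map nrm) (b.map nrm) (i' + 1) j'
          · rw [if_pos hge, if_pos hge]
            exact ih i' (j' + 1) (by omega) (by omega) (by omega) acc
          · rw [if_neg hge, if_neg hge]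
            exact ih (i' + 1) j' (by omega) (by omega) (by omega) acc

theorem lcsA_eq_ideal (a0 b0 : List String) :
    lcsA a0 b0 =
      idealLcs ((PySem.List.slice a0 none (some 200)).map nrm)
        ((PySem.List.slice b0 none (some 200)).map nrm)
        (PySem.List.slice a0 none (some 200))
        (PySem.List.slice a0 none (some 200)).length
        (PySem.List.slice b0 none (some 200)).length := by
  simp only [lcsA]
  generalize PySem.List.slice a0 none (some 200) = a
  generalize PySem.List.slice b0 none (some 200) = b
  rw [outer_loop a b a.length b.length rfl rfl]
  have hdp : ∀ i j : Nat, i ≤ a.length → j ≤ b.length →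
      ((dpMid (a.map nrm) (b.map nrm) a.length b.length a.length b.length).getD i []).getD j 0 =
        L (a.map nrm) (b.map nrm) i j := by
    intro i j hi hj
    rcases Nat.lt_or_ge i a.length with hlt | hge
    · rw [dpMid_getD_lt (a.map nrm) (b.map nrm) a.length b.length a.length b.length i hlt,
        rowP_getD (a.map nrm) (b.map nrm) b.length i b.length j hj, if_pos hj]
    · have hieq : i = a.length := by omega
      subst hieq
      rw [dpMid_getD_self (a.map nrm) (b.map nrm) a.length b.length a.length b.length,
        rowP_getD (a.map nrm) (b.map nrm) b.length a.length b.length j hj, if_pos hj]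
  rw [backA_eq a b _ a.length b.length rfl rfl hdp (a.length + b.length) a.length b.length
    (le_refl _) (le_refl _) (le_refl _) []]
  simp

-- ===== VERDICT (by name: the statement is the Claim_ definition above) =====
theorem compute_added_removed_py_spec : Claim_equal_compute_added_removed_py := by
  intro ct pt _
  unfold Spec_compute_added_removed_py
  unfold compute_added_removed_py compute_added_removed_py_alt leftoverB
  simp only [letFun]
  rw [lcsA_eq_ideal ct pt]
  have hgood := (lcsLenB_spec ((PySem.List.slice ct none (some 200)).map nrm)
      ((PySem.List.slice pt none (some 200)).map nrm)
      ((PySem.List.slice ct none (some 200)).length + (PySem.List.slice pt none (some 200)).length)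
      (PySem.List.slice ct none (some 200)).length (PySem.List.slice pt none (some 200)).length
      PySem.Dict.empty (le_refl _) (goodM_empty _ _)).2
  rw [reconB_spec ((PySem.List.slice ct none (some 200)).map nrm)
      ((PySem.List.slice pt none (some 200)).map nrm) (PySem.List.slice ct none (some 200))
      ((PySem.List.slice ct none (some 200)).length + (PySem.List.slice pt none (some 200)).length)
      (PySem.List.slice ct none (some 200)).length (PySem.List.slice pt none (some 200)).length
      _ (le_refl _) hgood]
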